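-- pv_equiv track=rewrite | github.com/CyL97/VidHalluc | DINO-HEAL/Video-LLaVA/clip_encoder.py | _best_factor_pair
-- ===== SOURCE A (Python) =====
-- import math
--
-- def _best_factor_pair(n: int):
--     """
--     Find a factor pair (h, w) with minimal difference.
--     """
--     best = (1, n)
--     for i in range(1, int(math.sqrt(n)) + 1):
--         if n % i == 0:
--             j = n // i
--             if abs(i - j) < abs(best[0] - best[1]):
--                 best = (i, j)
--     return best
-- ===== SOURCE B (Python) =====
-- import math
--
-- def _best_factor_pair(n: int):
--     # Scan downward from the integer sqrt: the first divisor found gives the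
--     # closest factor pair; fall through to (1, n) when no divisor is hit.
--     for i in range(int(math.sqrt(n)), 0, -1):
--         if n % i == 0:
--             return (i, n // i)
--     return (1, n)
-- ===== Notes on version B (the rewrite author's own statement) =====
-- stated objective: simpler
-- what changed: Replaces A's upward scan with a best-so-far accumulator by a downward scan from the integer square root that returns at the first divisor found (the largest divisor not exceeding sqrt(n) gives the closest pair), with (1, n) as fall-through.
import Mathlib
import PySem

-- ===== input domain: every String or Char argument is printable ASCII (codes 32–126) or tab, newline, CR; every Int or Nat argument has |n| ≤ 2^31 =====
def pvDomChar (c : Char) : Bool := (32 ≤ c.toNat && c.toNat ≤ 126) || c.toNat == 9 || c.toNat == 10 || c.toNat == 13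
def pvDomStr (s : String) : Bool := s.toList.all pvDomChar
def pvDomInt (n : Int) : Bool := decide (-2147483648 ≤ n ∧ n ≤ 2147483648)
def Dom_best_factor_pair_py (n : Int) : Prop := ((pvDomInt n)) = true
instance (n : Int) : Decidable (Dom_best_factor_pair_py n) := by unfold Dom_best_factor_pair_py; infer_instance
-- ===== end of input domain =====

-- B scans downward from the integer square root and returns at the FIRST divisor,
-- replacing A's upward scan with a best-so-far accumulator (objective: simpler).

-- ===== PORT A =====
-- int(math.sqrt(n)): for 0 ≤ n ≤ 2^31 the double sqrt truncates to exactly the integer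
-- square root, so this port is exact on Dom ∩ Pre_; negative n raises (excluded by Pre_).
def pyIntSqrt (n : Int) : Int := Int.ofNat n.toNat.sqrt

-- the body of A's for-loop
def stepA (n : Int) (best : Int × Int) (i : Int) : Int × Int :=
  if PySem.Int.mod n i = 0 then
    let j := PySem.Int.floordiv n i
    if |i - j| < |best.1 - best.2| then (i, j) else best
  else best

def best_factor_pair_py (n : Int) : Int × Int :=
  (PySem.List.pyRange 1 (pyIntSqrt n + 1) 1).foldl (stepA n) (1, n)

-- ===== PORT B =====
-- Source B's 'for i in range(int(math.sqrt(n)), 0, -1): if n % i == 0: return (i, n // i)'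
-- as a downward structural recursion on the counter (checks i+1, then recurses to i),
-- falling through to (1, n) when the counter reaches 0.
def altLoop (n : Int) : Nat → Int × Int
  | 0 => (1, n)
  | i + 1 =>
    if PySem.Int.mod n ((i : Int) + 1) = 0 then
      (((i : Int) + 1), PySem.Int.floordiv n ((i : Int) + 1))
    else altLoop n i

def best_factor_pair_py_alt (n : Int) : Int × Int := altLoop n n.toNat.sqrt

-- ===== PRECONDITION & SPEC =====
-- math.sqrt raises ValueError on negative n (in both A and B), so Pre_ is 0 ≤ n.
def Pre_best_factor_pair_py (n : Int) : Prop := 0 ≤ n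
instance (n : Int) : Decidable (Pre_best_factor_pair_py n) := by unfold Pre_best_factor_pair_py; infer_instance
def pvWitness_best_factor_pair_py : Int := 12

def Spec_best_factor_pair_py (n : Int) (out : Int × Int) : Prop := out = best_factor_pair_py_alt n
instance (n : Int) (out : Int × Int) : Decidable (Spec_best_factor_pair_py n out) := by unfold Spec_best_factor_pair_py; infer_instance

-- ===== CLAIM (what is proved, stated in full; the proofs are below) =====
def Claim_equal_best_factor_pair_py : Prop := ∀ (n : Int), Dom_best_factor_pair_py n → Pre_best_factor_pair_py n → Spec_best_factor_pair_py n (best_factor_pair_py n)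

-- ===== LEMMAS AND PROOFS =====

-- For a divisor i with i*i ≤ n, the cofactor n/i is at least i.
lemma le_ediv_self {n i : Int} (hi : 0 < i) (hsq : i * i ≤ n) (hdvd : i ∣ n) :
    i ≤ n / i := by
  nlinarith [Int.ediv_mul_cancel hdvd]

-- A strictly larger divisor gives a strictly smaller cofactor.
lemma ediv_lt_ediv_of_dvd {n d i : Int} (hn : 1 ≤ n) (hd : 0 < d) (hdi : d < i)
    (hddvd : d ∣ n) (hidvd : i ∣ n) : n / i < n / d := by
  have h1 := Int.ediv_mul_cancel hddvd
  have h2 := Int.ediv_mul_cancel hidvd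
  have hqd : 1 ≤ n / d := by nlinarith
  have hqi : 1 ≤ n / i := by nlinarith
  by_contra h
  push Not at h
  nlinarith

-- Main invariant: A's fold over [1..s] equals B's downward scan from s, and the latter
-- is (d, n/d) for the largest-so-far divisor d with 1 ≤ d ≤ max s 1.
lemma loop_eq (n : Int) (hn : 1 ≤ n) (s : Nat) (hs : s ≤ n.toNat.sqrt) :
    (PySem.List.pyRange 1 ((s : Int) + 1) 1).foldl (stepA n) (1, n) = altLoop n s
    ∧ ∃ d : Int, 1 ≤ d ∧ d ≤ max (s : Int) 1 ∧ d ∣ n ∧ altLoop n s = (d, n / d) := by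
  induction s with
  | zero =>
    refine ⟨?_, 1, le_refl _, by simp, one_dvd n, by simp [altLoop]⟩
    rw [PySem.List.pyRange_one_eq_nil (by norm_num)]
    simp [altLoop]
  | succ s ih =>
    obtain ⟨IH, d, hd1, hd2, hddvd, halt⟩ := ih (Nat.le_of_succ_le hs)
    have hdpos : 0 < d := by omega
    set i : Int := (s : Int) + 1 with hidef
    have hipos : 0 < i := by positivity
    have hsq : i * i ≤ n := by
      have h1 : (s + 1) * (s + 1) ≤ n.toNat := Nat.le_sqrt.mp hs
      have h2 : ((s + 1) * (s + 1) : Int) ≤ (n.toNat : Int) := by exact_mod_cast h1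
      rw [Int.toNat_of_nonneg (by omega)] at h2
      nlinarith
    have hsplit : PySem.List.pyRange 1 (((s + 1 : Nat) : Int) + 1) 1
        = PySem.List.pyRange 1 ((s : Int) + 1) 1 ++ [i] := by
      have : (((s + 1 : Nat) : Int) + 1) = i + 1 := by push_cast [hidef]; ring
      rw [this, PySem.List.pyRange_one_succ_right (by omega)]
    rw [hsplit, List.foldl_append, IH, halt]
    by_cases hdv : i ∣ n
    · have hmod : PySem.Int.mod n i = 0 := (PySem.Int.mod_eq_zero_iff_dvd n i).mpr hdv
      have hfd : PySem.Int.floordiv n i = n / i := PySem.Int.floordiv_eq_ediv_of_pos hipos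
      have haltsucc : altLoop n (s + 1) = (i, n / i) := by
        simp [altLoop, ← hidef, hmod, hfd]
      rcases Nat.eq_zero_or_pos s with hs0 | hs1
      · -- s = 0 : i = 1, d = 1, the comparison |1-n| < |1-n| is false but both sides are (1, n)
        subst hs0
        have hd_eq : d = 1 := by simp at hd2; omega
        subst hd_eq
        have hi1 : i = 1 := by simp [hidef]
        rw [hi1] at haltsucc ⊢
        simp only [List.foldl_cons, List.foldl_nil, stepA]
        rw [hi1] at hmod hfd
        simp [haltsucc]
      · -- 1 ≤ s : d ≤ s < i, the new pair strictly improves, so A updates to (i, n/i)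
        have hmax : max (s : Int) 1 = (s : Int) := max_eq_left (by exact_mod_cast hs1)
        rw [hmax] at hd2
        have hdlt : d < i := by rw [hidef]; omega
        have hdsq : d * d ≤ n := by nlinarith
        have hdle : d ≤ n / d := le_ediv_self hdpos hdsq hddvd
        have hile : i ≤ n / i := le_ediv_self hipos hsq hdv
        have hqlt : n / i < n / d := ediv_lt_ediv_of_dvd hn hdpos hdlt hddvd hdv
        have hcond : |i - n / i| < |d - n / d| := by
          rw [abs_of_nonpos (by omega), abs_of_nonpos (by omega)]
          omega
        refine ⟨?_, i, by omega, ?_, hdv, haltsucc⟩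
        · simp [stepA, hmod, hfd, hcond, haltsucc]
        · push_cast
          rw [hidef]
          exact le_max_left _ _
    · have hmod : PySem.Int.mod n i ≠ 0 := fun h => hdv ((PySem.Int.mod_eq_zero_iff_dvd n i).mp h)
      have haltsucc : altLoop n (s + 1) = (d, n / d) := by
        simp [altLoop, ← hidef, hmod, halt]
      refine ⟨?_, d, hd1, ?_, hddvd, haltsucc⟩
      · simp [stepA, hmod, haltsucc]
      · push_cast
        exact le_trans hd2 (by apply max_le_max <;> omega)

-- ===== VERDICT (by name: the statement is the Claim_ definition above) =====
theorem best_factor_pair_py_spec : Claim_equal_best_factor_pair_py := by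
  intro n _ hpre
  unfold Spec_best_factor_pair_py
  rcases eq_or_lt_of_le hpre with h0 | hpos
  · subst h0; decide
  · have hn : 1 ≤ n := hpos
    have := (loop_eq n hn n.toNat.sqrt le_rfl).1
    unfold best_factor_pair_py best_factor_pair_py_alt pyIntSqrt
    simpa using this
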